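-- pv_equiv track=rewrite | github.com/nitin-indukuri/gdsfactory_projects | gplugin/yml_spice_plugin.py | _build_inst_port_to_net
-- ===== SOURCE A (Python) =====
-- def _build_inst_port_to_net(ports: dict, routes: dict) -> dict[str, str]:
--     """
--     Build mapping: "inst,port" -> net_name using ports (ext pin -> inst,port) and
--     routes (links: inst1,port1: inst2,port2). External names (RFIN, GND, ...) become net names;
--     internal nets get n1, n2, ...
--     """
--     inst_port_to_net = {}
--     # Top-level ports: external pin name is the net at that inst,port
--     for ext_name, inst_port in (ports or {}).items():
--         if isinstance(inst_port, str) and "," in inst_port: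
--             inst_port_to_net[inst_port.strip()] = ext_name
--
--     # Routes: each link connects two inst,ports to the same net
--     net_counter = [0]
--
--     def assign_net(*keys: str) -> str:
--         for k in keys:
--             if k in inst_port_to_net:
--                 return inst_port_to_net[k]
--         net_counter[0] += 1
--         n = f"n{net_counter[0]}"
--         for k in keys:
--             inst_port_to_net[k] = n
--         return n
--
--     for bundle in (routes or {}).values():
--         links = bundle.get("links") or {}
--         if isinstance(links, dict):
--             for left, right in links.items():
--                 left = left.strip() if isinstance(left, str) else str(left)
--                 right = right.strip() if isinstance(right, str) else str(right)
--                 n1 = inst_port_to_net.get(left)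
--                 n2 = inst_port_to_net.get(right)
--                 if n1 and n2:
--                     if n1 != n2:
--                         # Merge: everything that was on n2 is now on n1
--                         for k in list(inst_port_to_net.keys()):
--                             if inst_port_to_net[k] == n2:
--                                 inst_port_to_net[k] = n1
--                 elif n1:
--                     inst_port_to_net[right] = n1
--                 elif n2:
--                     inst_port_to_net[left] = n2
--                 else:
--                     n = assign_net(left, right)
--                     inst_port_to_net[left] = inst_port_to_net[right] = n
--
--     return inst_port_to_net
-- ===== SOURCE B (Python) =====
-- def _build_inst_port_to_net(ports: dict, routes: dict) -> dict[str, str]: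
--     """
--     Build mapping: "inst,port" -> net_name using ports (ext pin -> inst,port) and
--     routes (links: inst1,port1: inst2,port2). External names (RFIN, GND, ...) become net names;
--     internal nets get n1, n2, ...
--     """
--     net = {}      # "inst,port" -> net name (the result)
--     members = {}  # net name -> keys that were given that name (lazy: may hold stale keys)
--
--     def put(key, name):
--         net[key] = name
--         members.setdefault(name, []).append(key)
--
--     for ext_name, inst_port in (ports or {}).items():
--         if isinstance(inst_port, str) and "," in inst_port:
--             put(inst_port.strip(), ext_name)
--
--     counter = 0
--     for bundle in (routes or {}).values():
--         links = bundle.get("links") or {}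
--         if isinstance(links, dict):
--             for left, right in links.items():
--                 left = left.strip() if isinstance(left, str) else str(left)
--                 right = right.strip() if isinstance(right, str) else str(right)
--                 n1 = net.get(left)
--                 n2 = net.get(right)
--                 if n1 is not None and n2 is not None:
--                     if n1 != n2:
--                         # merge: move the keys of net n2 over to n1
--                         for k in members.pop(n2):
--                             if net[k] == n2:
--                                 put(k, n1)
--                 elif n1 is not None:
--                     put(right, n1)
--                 elif n2 is not None:
--                     put(left, n2)
--                 else:
--                     counter += 1
--                     name = f"n{counter}"
--                     put(left, name)
--                     put(right, name)
--     return net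
-- ===== Notes on version B (the rewrite author's own statement) =====
-- stated objective: alternative
-- what changed: B maintains a reverse index (net name -> keys given that name) so a merge relabels only the merged net's members instead of A's rescan of the whole mapping, and B tests key presence with get()/None instead of A's truthiness; Pre_ therefore excludes ports entries with an empty external pin name mapping to an 'inst,port' value, whose empty-string net name A's truthiness tests treat as unassigned while its membership test treats it as assigned - an accident of A's implementation.
import Mathlib
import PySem

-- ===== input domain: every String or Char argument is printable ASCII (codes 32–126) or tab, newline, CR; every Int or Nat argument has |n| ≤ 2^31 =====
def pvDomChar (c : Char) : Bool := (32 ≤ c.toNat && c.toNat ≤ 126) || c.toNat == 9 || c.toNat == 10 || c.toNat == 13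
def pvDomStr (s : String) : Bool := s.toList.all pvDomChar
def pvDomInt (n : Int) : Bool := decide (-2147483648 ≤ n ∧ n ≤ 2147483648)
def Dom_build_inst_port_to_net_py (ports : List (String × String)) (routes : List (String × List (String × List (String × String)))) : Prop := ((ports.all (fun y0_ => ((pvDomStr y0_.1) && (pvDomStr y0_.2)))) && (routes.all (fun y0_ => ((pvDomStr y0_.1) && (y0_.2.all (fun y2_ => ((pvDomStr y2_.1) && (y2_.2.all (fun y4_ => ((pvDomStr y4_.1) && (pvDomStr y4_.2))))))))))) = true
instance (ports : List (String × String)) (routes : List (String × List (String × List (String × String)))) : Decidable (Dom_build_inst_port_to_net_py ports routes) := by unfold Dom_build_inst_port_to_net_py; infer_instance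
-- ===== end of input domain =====

-- B keeps a reverse index net-name -> keys, so a merge relabels only the merged
-- net's members instead of rescanning the whole mapping; return values are
-- proved identical on Pre_ (which excludes the empty-external-pin-name corner).

-- Python truthiness of an Optional[str] value (None and "" are falsy) — used by A's port
def pvTruthy (o : Option String) : Bool :=
  match o with
  | none => false
  | some s => !(s == "")

-- ===== PORT A =====
-- `for k in keys: if k in d: return d[k]` inside assign_net
def pvAssignFind (d : PySem.Dict String String) : List String → Option String
  | [] => none
  | k :: ks =>
    match d.get? k with
    | some v => some v
    | none => pvAssignFind d ks

-- assign_net(*keys): returns (net name, dict, counter)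
def pvAssignNet (d : PySem.Dict String String) (c : Int) (keys : List String) :
    String × PySem.Dict String String × Int :=
  match pvAssignFind d keys with
  | some v => (v, d, c)
  | none =>
    let c' := c + 1
    let n := "n" ++ PySem.Int.toStr c'
    (n, keys.foldl (fun dd k => dd.insert k n) d, c')

-- `for k in list(d.keys()): if d[k] == n2: d[k] = n1`
def pvRelabelA (d : PySem.Dict String String) (s2 s1 : String) : PySem.Dict String String :=
  d.keys.foldl (fun dd k =>
    match dd.get? k with
    | some v => if v == s2 then dd.insert k s1 else dd
    | none => dd) d

-- body of `for left, right in links.items()`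
def pvLinkStepA (st : PySem.Dict String String × Int) (lr : String × String) :
    PySem.Dict String String × Int :=
  let left := PySem.Str.strip lr.1
  let right := PySem.Str.strip lr.2
  let n1 := st.1.get? left
  let n2 := st.1.get? right
  if pvTruthy n1 && pvTruthy n2 then
    if n1 ≠ n2 then (pvRelabelA st.1 (n2.getD "") (n1.getD ""), st.2) else st
  else if pvTruthy n1 then (st.1.insert right (n1.getD ""), st.2)
  else if pvTruthy n2 then (st.1.insert left (n2.getD ""), st.2)
  else
    let r := pvAssignNet st.1 st.2 [left, right]
    ((r.2.1.insert left r.1).insert right r.1, r.2.2)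

def build_inst_port_to_net_py (ports : List (String × String)) (routes : List (String × List (String × List (String × String)))) : List (String × String) :=
  let d0 := (PySem.Dict.ofList ports).items.foldl
    (fun d ep => if PySem.Str.isIn "," ep.2 then d.insert (PySem.Str.strip ep.2) ep.1 else d)
    PySem.Dict.empty
  let st := (PySem.Dict.ofList routes).values.foldl
    (fun st bundle =>
      (PySem.Dict.ofList ((PySem.Dict.ofList bundle).getD "links" [])).items.foldl pvLinkStepA st)
    (d0, (0 : Int))
  st.1.items

-- ===== PORT B =====
-- put(key, name): net[key] = name; members.setdefault(name, []).append(key)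
def pvPutB (net : PySem.Dict String String) (mem : PySem.Dict String (List String))
    (k n : String) : PySem.Dict String String × PySem.Dict String (List String) :=
  (net.insert k n, mem.insert n (mem.getD n [] ++ [k]))

-- body of `for k in members.pop(n2): if net[k] == n2: put(k, n1)`
def pvMoveStep (s2 s1 : String)
    (nm : PySem.Dict String String × PySem.Dict String (List String)) (k : String) :
    PySem.Dict String String × PySem.Dict String (List String) :=
  if nm.1.get? k = some s2 then pvPutB nm.1 nm.2 k s1 else nm

-- members.pop(n2): ported as getD + erase; exact whenever n2 is a key of members,
-- which the reverse-index invariant guarantees on every reachable state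
def pvMergeB (net : PySem.Dict String String) (mem : PySem.Dict String (List String))
    (s2 s1 : String) : PySem.Dict String String × PySem.Dict String (List String) :=
  (mem.getD s2 []).foldl (pvMoveStep s2 s1) (net, mem.erase s2)

def pvLinkStepB
    (st : PySem.Dict String String × PySem.Dict String (List String) × Int)
    (lr : String × String) :
    PySem.Dict String String × PySem.Dict String (List String) × Int :=
  let left := PySem.Str.strip lr.1
  let right := PySem.Str.strip lr.2
  match st.1.get? left, st.1.get? right with
  | some s1, some s2 =>
    if s1 ≠ s2 then
      let r := pvMergeB st.1 st.2.1 s2 s1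
      (r.1, r.2, st.2.2)
    else st
  | some s1, none =>
    let r := pvPutB st.1 st.2.1 right s1
    (r.1, r.2, st.2.2)
  | none, some s2 =>
    let r := pvPutB st.1 st.2.1 left s2
    (r.1, r.2, st.2.2)
  | none, none =>
    let n := "n" ++ PySem.Int.toStr (st.2.2 + 1)
    let r1 := pvPutB st.1 st.2.1 left n
    let r2 := pvPutB r1.1 r1.2 right n
    (r2.1, r2.2, st.2.2 + 1)

def build_inst_port_to_net_py_alt (ports : List (String × String)) (routes : List (String × List (String × List (String × String)))) : List (String × String) :=
  let st0 := (PySem.Dict.ofList ports).items.foldl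
    (fun (nm : PySem.Dict String String × PySem.Dict String (List String)) ep =>
      if PySem.Str.isIn "," ep.2 then pvPutB nm.1 nm.2 (PySem.Str.strip ep.2) ep.1 else nm)
    (PySem.Dict.empty, PySem.Dict.empty)
  let st := (PySem.Dict.ofList routes).values.foldl
    (fun st bundle =>
      (PySem.Dict.ofList ((PySem.Dict.ofList bundle).getD "links" [])).items.foldl pvLinkStepB st)
    (st0.1, st0.2, (0 : Int))
  st.1.items

-- ===== PRECONDITION & SPEC =====
-- Pre_ excludes ports entries with an EMPTY external pin name whose target contains ','
-- (A still returns there): such an entry seeds an empty-string net name, which A's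
-- truthiness tests treat as unassigned while its `in`-membership test treats as assigned —
-- an accident of A's implementation; B treats any present key as assigned.
def Pre_build_inst_port_to_net_py (ports : List (String × String)) (routes : List (String × List (String × List (String × String)))) : Prop :=
  (ports.all (fun p => !(p.1 == "" && PySem.Str.isIn "," p.2))) = true
instance (ports : List (String × String)) (routes : List (String × List (String × List (String × String)))) : Decidable (Pre_build_inst_port_to_net_py ports routes) := by unfold Pre_build_inst_port_to_net_py; infer_instance

def pvWitness_build_inst_port_to_net_py : (List (String × String)) × (List (String × List (String × List (String × String)))) :=
  ([("RFIN", "a,b")], [("r1", [("links", [("a,b", "c,d")])])])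

def Spec_build_inst_port_to_net_py (ports : List (String × String)) (routes : List (String × List (String × List (String × String)))) (out : List (String × String)) : Prop := out = build_inst_port_to_net_py_alt ports routes
instance (ports : List (String × String)) (routes : List (String × List (String × List (String × String)))) (out : List (String × String)) : Decidable (Spec_build_inst_port_to_net_py ports routes out) := by unfold Spec_build_inst_port_to_net_py; infer_instance

-- ===== CLAIM (what is proved, stated in full; the proofs are below) =====
def Claim_equal_build_inst_port_to_net_py : Prop := ∀ (ports : List (String × String)) (routes : List (String × List (String × List (String × String)))), Dom_build_inst_port_to_net_py ports routes → Pre_build_inst_port_to_net_py ports routes → Spec_build_inst_port_to_net_py ports routes (build_inst_port_to_net_py ports routes)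

-- ===== LEMMAS AND PROOFS =====

-- B's reverse-index invariant: every key currently mapped to net v is recorded in members[v]
def pvInv (net : PySem.Dict String String) (mem : PySem.Dict String (List String)) : Prop :=
  ∀ k v, net.get? k = some v → k ∈ mem.getD v []

-- on Pre_ inputs every net name in the mapping is nonempty
def pvVals (net : PySem.Dict String String) : Prop :=
  ∀ k v, net.get? k = some v → v ≠ ""

-- the relation between A's state and B's state maintained through the link loops
def pvRel (a : PySem.Dict String String × Int)
    (b : PySem.Dict String String × PySem.Dict String (List String) × Int) : Prop :=
  b.1 = a.1 ∧ b.2.2 = a.2 ∧ a.1.keys.Nodup ∧ pvInv b.1 b.2.1 ∧ pvVals a.1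

theorem pvFoldl_rel {α β γ : Type} {R : α → β → Prop} {f : α → γ → α} {g : β → γ → β}
    (hs : ∀ a b c, R a b → R (f a c) (g b c)) :
    ∀ (l : List γ) (a : α) (b : β), R a b → R (l.foldl f a) (l.foldl g b) := by
  intro l
  induction l with
  | nil => intro a b h; exact h
  | cons x xs ih => intro a b h; exact ih _ _ (hs a b x h)

theorem pvFoldl_rel_mem {α β γ : Type} {R : α → β → Prop} {f : α → γ → α} {g : β → γ → β} :
    ∀ (l : List γ), (∀ a b c, c ∈ l → R a b → R (f a c) (g b c)) →
    ∀ (a : α) (b : β), R a b → R (l.foldl f a) (l.foldl g b) := by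
  intro l
  induction l with
  | nil => intro _ a b h; exact h
  | cons x xs ih =>
    intro hs a b h
    exact ih (fun a b c hc => hs a b c (List.mem_cons_of_mem _ hc)) _ _
      (hs a b x List.mem_cons_self h)

theorem pv_find?_filter_ne {ν : Type} (l : List (String × ν)) (k k' : String) (h : k' ≠ k) :
    (l.filter (fun p => !(p.1 == k))).find? (fun p => p.1 == k') = l.find? (fun p => p.1 == k') := by
  have h2 : ¬ k = k' := fun e => h e.symm
  induction l with
  | nil => rfl
  | cons p ps ih =>
    rw [List.filter_cons]
    by_cases hp : p.1 = k
    · simp [hp, h2, ih]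
    · by_cases hq : p.1 = k'
      · simp [hq, h]
      · simp [hp, hq, ih]

theorem pv_get?_erase_of_ne {ν : Type} (d : PySem.Dict String ν) (k k' : String) (h : k' ≠ k) :
    (d.erase k).get? k' = d.get? k' := by
  rw [PySem.Dict.erase.eq_def, PySem.Dict.get?.eq_def, PySem.Dict.get?.eq_def]
  simp only
  rw [pv_find?_filter_ne _ _ _ h]

theorem pv_getD_erase_of_ne (d : PySem.Dict String (List String)) (k k' : String) (h : k' ≠ k) :
    (d.erase k).getD k' [] = d.getD k' [] := by
  rw [PySem.Dict.getD_eq_get?_getD, PySem.Dict.getD_eq_get?_getD, pv_get?_erase_of_ne _ _ _ h]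

theorem pvPutB_inv (net : PySem.Dict String String) (mem : PySem.Dict String (List String))
    (k n : String) (h : pvInv net mem) :
    pvInv (pvPutB net mem k n).1 (pvPutB net mem k n).2 := by
  intro k' v hv
  unfold pvPutB at hv ⊢
  simp only at hv ⊢
  by_cases hk : k' = k
  · subst hk
    rw [PySem.Dict.get?_insert_self] at hv
    cases hv
    rw [PySem.Dict.getD_insert_self]
    exact List.mem_append_right _ (List.mem_singleton.mpr rfl)
  · rw [PySem.Dict.get?_insert_of_ne _ _ hk] at hv
    by_cases hn : v = n
    · subst hn
      rw [PySem.Dict.getD_insert_self]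
      exact List.mem_append_left _ (h _ _ hv)
    · rw [PySem.Dict.getD_insert_of_ne _ _ _ hn]
      exact h _ _ hv

theorem pvVals_insert (d : PySem.Dict String String) (k v : String)
    (hv : pvVals d) (hne : v ≠ "") : pvVals (d.insert k v) := by
  intro k' v' h
  by_cases hk : k' = k
  · subst hk
    rw [PySem.Dict.get?_insert_self] at h
    cases h
    exact hne
  · rw [PySem.Dict.get?_insert_of_ne _ _ hk] at h
    exact hv _ _ h

theorem pv_fresh_ne_empty (s : String) : ("n" ++ s) ≠ "" := by
  intro h
  have := congrArg String.length h
  simp [String.length_append] at this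

-- the pure relabeling both programs realise on the items list
def pvF (s2 s1 : String) (p : String × String) : String × String :=
  if p.2 == s2 then (p.1, s1) else p

theorem pvF_fst (s2 s1 : String) (p : String × String) : (pvF s2 s1 p).1 = p.1 := by
  unfold pvF; split <;> rfl

theorem pvVals_relabel (d bn : PySem.Dict String String) (s2 s1 : String)
    (hit : d.items = bn.items.map (pvF s2 s1)) (hv : pvVals bn) (hnd : bn.keys.Nodup)
    (hs1 : s1 ≠ "") : pvVals d := by
  intro k v hkv
  have hm := PySem.Dict.mem_items_of_get?_eq_some d hkv
  rw [hit] at hm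
  obtain ⟨p, hp, he⟩ := List.mem_map.mp hm
  have hg := PySem.Dict.get?_of_mem_items bn hp hnd
  unfold pvF at he
  by_cases hc : p.2 = s2
  · simp only [hc, beq_self_eq_true, if_pos] at he
    cases he
    exact hs1
  · have hb : (p.2 == s2) = false := by simp [hc]
    rw [hb] at he
    simp only [Bool.false_eq_true, if_false] at he
    cases he
    exact hv _ _ hg

theorem pvRelabelA_go (s2 s1 : String) (hne : s1 ≠ s2) :
    ∀ (ks : List String) (dd : PySem.Dict String String), dd.keys.Nodup →
    (ks.foldl (fun dd k =>
      match dd.get? k with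
      | some v => if v == s2 then dd.insert k s1 else dd
      | none => dd) dd).items
      = dd.items.map (fun p => if ks.contains p.1 && p.2 == s2 then (p.1, s1) else p) := by
  intro ks
  induction ks with
  | nil => intro dd hnd; simp
  | cons k ks ih =>
    intro dd hnd
    rw [List.foldl_cons]
    rcases hv : dd.get? k with _ | v
    ·
      rw [ih dd hnd]
      apply List.map_congr_left
      intro p hp
      have hpk : p.1 ≠ k := by
        intro e
        have := PySem.Dict.get?_of_mem_items dd hp hnd
        rw [e, hv] at this; cases this
      simp [hpk]
    ·
      by_cases hvs : v = s2
      · have hcont : dd.contains k = true := by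
          rw [PySem.Dict.contains_eq_isSome_get?, hv]; rfl
        simp only [hvs, beq_self_eq_true, if_pos]
        rw [ih _ (PySem.Dict.nodup_keys_insert dd k s1 hnd)]
        rw [PySem.Dict.items_insert_of_contains dd s1 hcont, List.map_map]
        apply List.map_congr_left
        intro p hp
        by_cases hpk : p.1 = k
        · have hps2 : p.2 = s2 := by
            have := PySem.Dict.get?_of_mem_items dd hp hnd
            rw [hpk, hv] at this; cases this; exact hvs.symm ▸ rfl
          simp [Function.comp, hpk, hps2, hne]
        · have hb : (p.1 == k) = false := by simp [hpk]
          simp [Function.comp, hb, hpk]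
      · have hvsb : (v == s2) = false := by simp [hvs]
        simp only [hvsb, Bool.false_eq_true, if_false]
        rw [ih dd hnd]
        apply List.map_congr_left
        intro p hp
        by_cases hpk : p.1 = k
        · have hps : p.2 = v := by
            have := PySem.Dict.get?_of_mem_items dd hp hnd
            rw [hpk, hv] at this; cases this; rfl
          simp [hpk, hps, hvs]
        · simp [hpk]

theorem pvRelabelA_items (d : PySem.Dict String String) (s2 s1 : String)
    (hnd : d.keys.Nodup) (hne : s1 ≠ s2) :
    (pvRelabelA d s2 s1).items = d.items.map (pvF s2 s1) := by
  unfold pvRelabelA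
  rw [pvRelabelA_go s2 s1 hne d.keys d hnd]
  apply List.map_congr_left
  intro p hp
  have hk : p.1 ∈ d.keys := by
    simp only [PySem.Dict.keys]
    exact List.mem_map_of_mem hp
  have hc : d.keys.contains p.1 = true := List.elem_eq_true_of_mem hk
  simp [pvF, hk]

theorem pvMergeB_go (s2 s1 : String) (hne : s1 ≠ s2) :
    ∀ (L : List String) (net : PySem.Dict String String) (m : PySem.Dict String (List String)),
    net.keys.Nodup →
    (∀ k, net.get? k = some s2 → k ∈ L) →
    (∀ k v, v ≠ s2 → net.get? k = some v → k ∈ m.getD v []) →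
    (L.foldl (pvMoveStep s2 s1) (net, m)).1.items = net.items.map (pvF s2 s1)
      ∧ pvInv (L.foldl (pvMoveStep s2 s1) (net, m)).1 (L.foldl (pvMoveStep s2 s1) (net, m)).2 := by
  intro L
  induction L with
  | nil =>
    intro net m hnd h2 h3
    simp only [List.foldl_nil]
    have hval : ∀ p ∈ net.items, p.2 ≠ s2 := by
      intro p hp he
      have hg := PySem.Dict.get?_of_mem_items net hp hnd
      exact absurd (h2 p.1 (he ▸ hg)) (List.not_mem_nil)
    constructor
    · have hid : ∀ p ∈ net.items, pvF s2 s1 p = p := by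
        intro p hp
        unfold pvF
        simp [hval p hp]
      rw [List.map_congr_left hid, List.map_id']
    · intro k v hv
      exact h3 k v (fun e => absurd (h2 k (e ▸ hv)) List.not_mem_nil) hv
  | cons k L ih =>
    intro net m hnd h2 h3
    rw [List.foldl_cons]
    by_cases hk : net.get? k = some s2
    · have hstep : pvMoveStep s2 s1 (net, m) k
          = (net.insert k s1, m.insert s1 (m.getD s1 [] ++ [k])) := by
        unfold pvMoveStep pvPutB
        simp [hk]
      rw [hstep]
      have hcont : net.contains k = true := by
        rw [PySem.Dict.contains_eq_isSome_get?, hk]; rfl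
      have hnd' : (net.insert k s1).keys.Nodup := PySem.Dict.nodup_keys_insert _ _ _ hnd
      have h2' : ∀ j, (net.insert k s1).get? j = some s2 → j ∈ L := by
        intro j hj
        by_cases hjk : j = k
        · subst hjk
          rw [PySem.Dict.get?_insert_self] at hj
          cases hj
          exact absurd rfl hne
        · rw [PySem.Dict.get?_insert_of_ne _ _ hjk] at hj
          rcases List.mem_cons.mp (h2 j hj) with hh | hh
          · exact absurd hh hjk
          · exact hh
      have h3' : ∀ j v, v ≠ s2 → (net.insert k s1).get? j = some v →
          j ∈ (m.insert s1 (m.getD s1 [] ++ [k])).getD v [] := by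
        intro j v hvne hj
        by_cases hjk : j = k
        · subst hjk
          rw [PySem.Dict.get?_insert_self] at hj
          cases hj
          rw [PySem.Dict.getD_insert_self]
          exact List.mem_append_right _ (List.mem_singleton.mpr rfl)
        · rw [PySem.Dict.get?_insert_of_ne _ _ hjk] at hj
          by_cases hvs1 : v = s1
          · rw [hvs1] at hj hvne ⊢
            rw [PySem.Dict.getD_insert_self]
            exact List.mem_append_left _ (h3 j s1 hvne hj)
          · rw [PySem.Dict.getD_insert_of_ne _ _ _ hvs1]
            exact h3 j v hvne hj
      obtain ⟨hitems, hinv⟩ := ih (net.insert k s1) (m.insert s1 (m.getD s1 [] ++ [k])) hnd' h2' h3'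
      refine ⟨?_, hinv⟩
      rw [hitems, PySem.Dict.items_insert_of_contains _ s1 hcont, List.map_map]
      apply List.map_congr_left
      intro p hp
      by_cases hpk : p.1 = k
      · have hps2 : p.2 = s2 := by
          have := PySem.Dict.get?_of_mem_items net hp hnd
          rw [hpk, hk] at this; cases this; rfl
        have hb : (p.1 == k) = true := by simp [hpk]
        simp only [Function.comp_apply, hb, if_pos]
        unfold pvF
        simp [hne, hpk, hps2]
      · have hb : (p.1 == k) = false := by simp [hpk]
        simp [Function.comp, hb]
    · have hstep : pvMoveStep s2 s1 (net, m) k = (net, m) := by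
        unfold pvMoveStep
        simp [hk]
      rw [hstep]
      apply ih net m hnd _ h3
      intro j hj
      have hjk : j ≠ k := fun e => hk (e ▸ hj)
      rcases List.mem_cons.mp (h2 j hj) with hh | hh
      · exact absurd hh hjk
      · exact hh

theorem pv_insert_same (d : PySem.Dict String String) (k v : String)
    (hnd : d.keys.Nodup) (h : d.get? k = some v) : d.insert k v = d := by
  apply PySem.Dict.ext
  have hcont : d.contains k = true := by
    rw [PySem.Dict.contains_eq_isSome_get?, h]; rfl
  rw [PySem.Dict.items_insert_of_contains d v hcont]
  have hid : ∀ p ∈ d.items, (if (p.1 == k) = true then (k, v) else p) = p := by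
    intro p hp
    by_cases hpk : p.1 = k
    · have hg := PySem.Dict.get?_of_mem_items d hp hnd
      rw [hpk, h] at hg
      have hv2 : v = p.2 := Option.some.inj hg
      have hb : (p.1 == k) = true := by simp [hpk]
      rw [if_pos hb, hv2, ← hpk]
    · simp [hpk]
  rw [List.map_congr_left hid, List.map_id']

theorem pv_keys_relabelA (d : PySem.Dict String String) (s2 s1 : String)
    (hnd : d.keys.Nodup) (hne : s1 ≠ s2) :
    (pvRelabelA d s2 s1).keys = d.keys := by
  simp only [PySem.Dict.keys]
  rw [pvRelabelA_items d s2 s1 hnd hne, List.map_map]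
  apply List.map_congr_left
  intro p _
  exact pvF_fst s2 s1 p

theorem pvLinkStep_rel (a : PySem.Dict String String × Int)
    (b : PySem.Dict String String × PySem.Dict String (List String) × Int)
    (lr : String × String) (h : pvRel a b) : pvRel (pvLinkStepA a lr) (pvLinkStepB b lr) := by
  obtain ⟨ad, ac⟩ := a
  obtain ⟨bn, bm, bc⟩ := b
  obtain ⟨h1, h2, h3, h4, h5⟩ := h
  simp only at h1 h2 h3 h4 h5
  subst h1
  subst h2
  unfold pvLinkStepA pvLinkStepB
  simp only
  rcases hc1 : bn.get? (PySem.Str.strip lr.1) with _ | s1 <;>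
    rcases hc2 : bn.get? (PySem.Str.strip lr.2) with _ | s2
  · -- none, none: fresh net name on both sides
    have hfind : pvAssignFind bn [PySem.Str.strip lr.1, PySem.Str.strip lr.2] = none := by
      simp only [pvAssignFind, hc1, hc2]
    have hassign : pvAssignNet bn bc [PySem.Str.strip lr.1, PySem.Str.strip lr.2]
        = ("n" ++ PySem.Int.toStr (bc + 1),
           (bn.insert (PySem.Str.strip lr.1) ("n" ++ PySem.Int.toStr (bc + 1))).insert
             (PySem.Str.strip lr.2) ("n" ++ PySem.Int.toStr (bc + 1)), bc + 1) := by
      unfold pvAssignNet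
      rw [hfind]
      rfl
    have hf : pvTruthy none = false := rfl
    simp only [hf, hassign, Bool.false_and, Bool.false_eq_true, if_false]
    have hnd2 : ((bn.insert (PySem.Str.strip lr.1) ("n" ++ PySem.Int.toStr (bc + 1))).insert
        (PySem.Str.strip lr.2) ("n" ++ PySem.Int.toStr (bc + 1))).keys.Nodup :=
      PySem.Dict.nodup_keys_insert _ _ _ (PySem.Dict.nodup_keys_insert _ _ _ h3)
    have hg1 : ((bn.insert (PySem.Str.strip lr.1) ("n" ++ PySem.Int.toStr (bc + 1))).insert
        (PySem.Str.strip lr.2) ("n" ++ PySem.Int.toStr (bc + 1))).get? (PySem.Str.strip lr.1)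
        = some ("n" ++ PySem.Int.toStr (bc + 1)) := by
      rw [PySem.Dict.get?_insert]
      split
      · rfl
      · exact PySem.Dict.get?_insert_self _ _ _
    have e1 := pv_insert_same _ _ _ hnd2 hg1
    have e2 := pv_insert_same _ (PySem.Str.strip lr.2) ("n" ++ PySem.Int.toStr (bc + 1))
      hnd2 (PySem.Dict.get?_insert_self _ _ _)
    refine ⟨?_, rfl, ?_, ?_, ?_⟩
    · rw [e1, e2]
      rfl
    · rw [e1, e2]
      exact hnd2
    · exact pvPutB_inv _ _ _ _ (pvPutB_inv _ _ _ _ h4)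
    · rw [e1, e2]
      exact pvVals_insert _ _ _ (pvVals_insert _ _ _ h5 (pv_fresh_ne_empty _))
        (pv_fresh_ne_empty _)
  · -- none, some s2
    have hs2 : s2 ≠ "" := h5 _ _ hc2
    have ht2 : pvTruthy (some s2) = true := by simp [pvTruthy, hs2]
    have hf : pvTruthy none = false := rfl
    simp only [ht2, hf, Bool.false_and, Bool.false_eq_true, if_false, if_true,
      Option.getD_some]
    refine ⟨rfl, rfl, PySem.Dict.nodup_keys_insert _ _ _ h3, pvPutB_inv _ _ _ _ h4,
      pvVals_insert _ _ _ h5 hs2⟩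
  · -- some s1, none
    have hs1 : s1 ≠ "" := h5 _ _ hc1
    have ht1 : pvTruthy (some s1) = true := by simp [pvTruthy, hs1]
    have hf : pvTruthy none = false := rfl
    simp only [ht1, hf, Bool.and_false, Bool.false_eq_true, if_false, if_true,
      Option.getD_some]
    refine ⟨rfl, rfl, PySem.Dict.nodup_keys_insert _ _ _ h3, pvPutB_inv _ _ _ _ h4,
      pvVals_insert _ _ _ h5 hs1⟩
  · -- some s1, some s2: merge when different
    have hs1 : s1 ≠ "" := h5 _ _ hc1
    have hs2 : s2 ≠ "" := h5 _ _ hc2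
    have ht1 : pvTruthy (some s1) = true := by simp [pvTruthy, hs1]
    have ht2 : pvTruthy (some s2) = true := by simp [pvTruthy, hs2]
    simp only [ht1, ht2, Bool.and_self, if_true, Option.getD_some]
    by_cases hne : s1 = s2
    · subst hne
      simp only [ne_eq, not_true_eq_false, if_false]
      exact ⟨rfl, rfl, h3, h4, h5⟩
    · have hone : (some s1 : Option String) ≠ some s2 := by
        intro e
        exact hne (Option.some.inj e)
      rw [if_pos hone, if_pos hne]
      have hcov : ∀ k, bn.get? k = some s2 → k ∈ bm.getD s2 [] := fun k hk => h4 k s2 hk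
      have h3' : ∀ k v, v ≠ s2 → bn.get? k = some v → k ∈ (bm.erase s2).getD v [] := by
        intro k v hv hk
        rw [pv_getD_erase_of_ne _ _ _ hv]
        exact h4 k v hk
      have hB := pvMergeB_go s2 s1 hne (bm.getD s2 []) bn (bm.erase s2) h3 hcov h3'
      have hA := pvRelabelA_items bn s2 s1 h3 hne
      have heq : (pvMergeB bn bm s2 s1).1 = pvRelabelA bn s2 s1 := by
        apply PySem.Dict.ext
        unfold pvMergeB
        rw [hA]
        exact hB.1
      refine ⟨heq, rfl, ?_, hB.2, ?_⟩
      · rw [pv_keys_relabelA bn s2 s1 h3 hne]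
        exact h3
      · exact pvVals_relabel _ bn s2 s1 hA h5 h3 hs1

-- items of Dict.ofList come from the original pair list
theorem pv_mem_items_update {ν : Type} :
    ∀ (ps : List (String × ν)) (d : PySem.Dict String ν) (p : String × ν),
    p ∈ (d.update ps).items → p ∈ d.items ∨ p ∈ ps := by
  intro ps
  induction ps with
  | nil => intro d p h; exact Or.inl h
  | cons q qs ih =>
    intro d p h
    have he : d.update (q :: qs) = (d.insert q.1 q.2).update qs := rfl
    rw [he] at h
    rcases ih _ _ h with h' | h'
    · rcases (PySem.Dict.mem_items_insert _ _ _ _).mp h' with h'' | ⟨hm, _⟩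
      · exact Or.inr (by rw [h'']; exact List.mem_cons_self)
      · exact Or.inl hm
    · exact Or.inr (List.mem_cons_of_mem _ h')

-- the relation through the ports loop
def pvRel0 (d : PySem.Dict String String)
    (nm : PySem.Dict String String × PySem.Dict String (List String)) : Prop :=
  nm.1 = d ∧ d.keys.Nodup ∧ pvInv nm.1 nm.2 ∧ pvVals d

theorem pvPortStep_rel (d : PySem.Dict String String)
    (nm : PySem.Dict String String × PySem.Dict String (List String))
    (ep : String × String) (hep : ¬(ep.1 = "" ∧ PySem.Str.isIn "," ep.2 = true))
    (h : pvRel0 d nm) :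
    pvRel0 (if PySem.Str.isIn "," ep.2 then d.insert (PySem.Str.strip ep.2) ep.1 else d)
      (if PySem.Str.isIn "," ep.2 then pvPutB nm.1 nm.2 (PySem.Str.strip ep.2) ep.1 else nm) := by
  obtain ⟨h1, h2, h3, h4⟩ := h
  by_cases hc : PySem.Str.isIn "," ep.2 = true
  · rw [if_pos hc, if_pos hc]
    subst h1
    have hne : ep.1 ≠ "" := fun e => hep ⟨e, hc⟩
    exact ⟨rfl, PySem.Dict.nodup_keys_insert _ _ _ h2, pvPutB_inv _ _ _ _ h3,
      pvVals_insert _ _ _ h4 hne⟩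
  · rw [if_neg hc, if_neg hc]
    exact ⟨h1, h2, h3, h4⟩

-- ===== VERDICT (by name: the statement is the Claim_ definition above) =====
theorem build_inst_port_to_net_py_spec : Claim_equal_build_inst_port_to_net_py := by
  intro ports routes _ hpre
  simp only [Spec_build_inst_port_to_net_py, build_inst_port_to_net_py, build_inst_port_to_net_py_alt]
  have h0 : pvRel0 PySem.Dict.empty (PySem.Dict.empty, PySem.Dict.empty) := by
    refine ⟨rfl, ?_, ?_, ?_⟩
    · exact PySem.Dict.nodup_keys_empty
    · intro k v hv
      rw [PySem.Dict.get?_empty] at hv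
      cases hv
    · intro k v hv
      rw [PySem.Dict.get?_empty] at hv
      cases hv
  have hports := pvFoldl_rel_mem (R := pvRel0) ((PySem.Dict.ofList ports).items)
    (fun d nm ep hmem h => by
      refine pvPortStep_rel d nm ep ?_ h
      rcases pv_mem_items_update ports PySem.Dict.empty ep hmem with hm | hm
      · cases hm
      · have := List.all_eq_true.mp hpre ep hm
        intro ⟨he, hi⟩
        rw [he, hi] at this
        simp at this) _ _ h0
  obtain ⟨hp1, hp2, hp3, hp4⟩ := hports
  have hrel0 : pvRel
      ((PySem.Dict.ofList ports).items.foldl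
        (fun d ep => if PySem.Str.isIn "," ep.2 then d.insert (PySem.Str.strip ep.2) ep.1 else d)
        PySem.Dict.empty, (0 : Int))
      (((PySem.Dict.ofList ports).items.foldl
        (fun nm ep => if PySem.Str.isIn "," ep.2 then pvPutB nm.1 nm.2 (PySem.Str.strip ep.2) ep.1 else nm)
        (PySem.Dict.empty, PySem.Dict.empty)).1,
       ((PySem.Dict.ofList ports).items.foldl
        (fun nm ep => if PySem.Str.isIn "," ep.2 then pvPutB nm.1 nm.2 (PySem.Str.strip ep.2) ep.1 else nm)
        (PySem.Dict.empty, PySem.Dict.empty)).2, (0 : Int)) := ⟨hp1, rfl, hp2, hp3, hp4⟩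
  have hbundle : ∀ a b c, pvRel a b →
      pvRel ((PySem.Dict.ofList ((PySem.Dict.ofList c).getD "links" ([] : List (String × String)))).items.foldl pvLinkStepA a)
            ((PySem.Dict.ofList ((PySem.Dict.ofList c).getD "links" ([] : List (String × String)))).items.foldl pvLinkStepB b) := by
    intro a b c h
    exact pvFoldl_rel (fun a b lr h => pvLinkStep_rel a b lr h) _ a b h
  have hmain := pvFoldl_rel (R := pvRel) hbundle ((PySem.Dict.ofList routes).values) _ _ hrel0
  rw [hmain.1]
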